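-- pv_equiv track=rewrite | github.com/cesargusto/propython | fundamentos/basicos/convbase.py | calcbase
-- ===== SOURCE A (Python) =====
-- def calcbase(s, digitos):
--     ''' devolve o valor de `s` na base numérica representada por `digitos`
--
--     A função padrão `int` faz essa conversão, mas `calcbase` aceita uma `str`
--     arbitrária de dígitos que não precisa ser uma faixa contínua nem ordenada
--     '''
--     base = len(digitos)
--     n = 0
--     for pot, dig in enumerate(reversed(s)):
--         try:
--             val_dig = digitos.index(dig)
--         except ValueError:
--             msg = 'digito invalido: "%s" nao ocorre em "%s"'
--             raise ValueError(msg % (dig, digitos))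
--         n += val_dig * (base**pot)
--     return n
-- ===== SOURCE B (Python) =====
-- def calcbase(s, digitos):
--     ''' devolve o valor de `s` na base numérica representada por `digitos` '''
--     val = {}
--     for i, ch in enumerate(digitos):
--         if ch not in val:
--             val[ch] = i
--     base = len(digitos)
--     n = 0
--     for ch in s:
--         n = n * base + val[ch]
--     return n
-- ===== Notes on version B (the rewrite author's own statement) =====
-- stated objective: faster
-- what changed: B builds a first-occurrence digit dictionary once and folds left-to-right with Horner's rule (n = n*base + val), replacing A's per-character string scan (digitos.index) and per-position big-int power base**pot.
import Mathlib
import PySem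

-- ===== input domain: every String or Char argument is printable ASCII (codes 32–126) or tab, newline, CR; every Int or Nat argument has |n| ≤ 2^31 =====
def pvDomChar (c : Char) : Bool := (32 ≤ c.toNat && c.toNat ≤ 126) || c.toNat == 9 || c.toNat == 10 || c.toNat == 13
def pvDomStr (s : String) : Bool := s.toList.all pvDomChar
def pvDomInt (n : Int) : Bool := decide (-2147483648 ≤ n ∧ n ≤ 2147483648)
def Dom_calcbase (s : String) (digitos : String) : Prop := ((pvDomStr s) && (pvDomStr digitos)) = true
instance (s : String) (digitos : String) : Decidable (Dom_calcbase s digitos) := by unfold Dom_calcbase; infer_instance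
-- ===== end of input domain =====

-- B replaces A's per-character linear scan of `digitos` and per-position power base**pot by a
-- digit dictionary built once plus a left-to-right Horner fold (objective: faster; return value only).

-- ===== PORT A =====
-- `digitos.index(dig)` (first occurrence of a single char; the ValueError branch is excluded by Pre_,
--  where PySem.List.index? returns none — the 0 default is never reached under Pre_).
def calcbase (s : String) (digitos : String) : Int :=
  let base : Int := PySem.Str.len digitos
  (PySem.List.enumerate s.toList.reverse 0).foldl
    (fun n pd =>
      let valDig : Int := match PySem.List.index? digitos.toList pd.2 with
        | some k => (k : Int)
        | none => 0
      n + valDig * base ^ pd.1.toNat) 0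

-- ===== PORT B =====
-- val[ch] would raise KeyError exactly where A raises ValueError; excluded by Pre_, so getD 0 never defaults there.
def calcbase_alt (s : String) (digitos : String) : Int :=
  let val : PySem.Dict Char Int :=
    (PySem.List.enumerate digitos.toList 0).foldl
      (fun d p => if d.contains p.2 then d else d.insert p.2 p.1) PySem.Dict.empty
  let base : Int := PySem.Str.len digitos
  s.toList.foldl (fun n ch => n * base + val.getD ch 0) 0

-- ===== PRECONDITION & SPEC =====
-- Pre_ excludes exactly the inputs on which A raises ValueError (a char of s not occurring in digitos).
def Pre_calcbase (s : String) (digitos : String) : Prop :=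
  (s.toList.all (fun c => digitos.toList.contains c)) = true
instance (s : String) (digitos : String) : Decidable (Pre_calcbase s digitos) := by
  unfold Pre_calcbase; infer_instance
def pvWitness_calcbase : String × String := ("2103", "0123")

def Spec_calcbase (s : String) (digitos : String) (out : Int) : Prop := out = calcbase_alt s digitos
instance (s : String) (digitos : String) (out : Int) : Decidable (Spec_calcbase s digitos out) := by unfold Spec_calcbase; infer_instance

-- ===== CLAIM (what is proved, stated in full; the proofs are below) =====
def Claim_equal_calcbase : Prop := ∀ (s : String) (digitos : String), Dom_calcbase s digitos → Pre_calcbase s digitos → Spec_calcbase s digitos (calcbase s digitos)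

-- ===== LEMMAS AND PROOFS =====

-- The dictionary B builds stores the FIRST occurrence index of each char of l (offset by i).
theorem pvDict_get? (l : List Char) (i : Int) (d : PySem.Dict Char Int) (c : Char) :
    ((PySem.List.enumerate l i).foldl
      (fun d p => if d.contains p.2 then d else d.insert p.2 p.1) d).get? c
    = if d.contains c then d.get? c
      else if c ∈ l then some (i + l.idxOf c) else d.get? c := by
  induction l generalizing i d with
  | nil => simp [PySem.List.enumerate_nil]
  | cons x t ih =>
    rw [PySem.List.enumerate_cons]
    simp only [List.foldl_cons]
    by_cases hdc : d.contains c = true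
    · by_cases hdx : d.contains x = true
      · simp [hdx, ih, hdc]
      · have hdx' : d.contains x = false := by simpa using hdx
        have hne : c ≠ x := fun h => by rw [h, hdx'] at hdc; exact Bool.noConfusion hdc
        have h1 : (d.insert x i).contains c = true := by
          rw [PySem.Dict.contains_insert]; simp [hdc]
        simp only [hdx', Bool.false_eq_true, if_false, ih, h1, if_true]
        rw [PySem.Dict.get?_insert_of_ne _ _ hne]
        simp [hdc]
    · have hdc' : d.contains c = false := by simpa using hdc
      by_cases hcx : c = x
      · subst hcx
        simp only [hdc', Bool.false_eq_true, if_false, ih]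
        have h1 : (d.insert c i).contains c = true := PySem.Dict.contains_insert_self d c i
        simp [h1, PySem.Dict.get?_insert_self]
      · have hstep : ∀ d' : PySem.Dict Char Int,
            (d' = if d.contains x then d else d.insert x i) →
            d'.contains c = false ∧ d'.get? c = d.get? c := by
          intro d' hd'
          by_cases hdx : d.contains x = true
          · simp [hd', hdx, hdc']
          · have hdx' : d.contains x = false := by simpa using hdx
            rw [hd', hdx']
            simp only [Bool.false_eq_true, if_false]
            constructor
            · rw [PySem.Dict.contains_insert]; simp [hcx, hdc']
            · exact PySem.Dict.get?_insert_of_ne _ _ hcx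
        obtain ⟨h1, h2⟩ := hstep _ rfl
        rw [ih, h1, if_neg (by simp), h2]
        simp only [hdc', Bool.false_eq_true, if_false]
        by_cases hct : c ∈ t
        · have hmem : c ∈ x :: t := List.mem_cons_of_mem _ hct
          rw [if_pos hct, if_pos hmem, List.idxOf_cons_ne _ (Ne.symm hcx)]
          congr 1
          push_cast
          ring
        · have : c ∉ x :: t := by simp [hcx, hct]
          simp [hct, this]

theorem pvDict_getD (dl : List Char) (c : Char) (hc : c ∈ dl) :
    (((PySem.List.enumerate dl 0).foldl
      (fun d p => if d.contains p.2 then d else d.insert p.2 p.1)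
      (PySem.Dict.empty : PySem.Dict Char Int)).getD c 0) = (dl.idxOf c : Int) := by
  rw [PySem.Dict.getD_eq_get?_getD, pvDict_get?]
  simp [hc, PySem.Dict.contains_empty]

-- A's `digitos.index` is the first-occurrence index under Pre_.
theorem pvIndex?_eq (dl : List Char) (c : Char) (hc : c ∈ dl) :
    PySem.List.index? dl c = some (dl.idxOf c) := by
  induction dl with
  | nil => cases hc
  | cons x t ih =>
    by_cases hcx : c = x
    · subst hcx
      rw [PySem.List.index?_cons_self, List.idxOf_cons_self]
    · have hct : c ∈ t := by cases hc with
        | head => exact absurd rfl hcx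
        | tail _ h => exact h
      rw [PySem.List.index?_cons_of_ne t (Ne.symm hcx), ih hct,
        List.idxOf_cons_ne _ (Ne.symm hcx)]
      rfl

theorem pvIndex_eq_idxOf (dl : List Char) (c : Char) (hc : c ∈ dl) :
    (match PySem.List.index? dl c with
      | some k => (k : Int)
      | none => 0) = (dl.idxOf c : Int) := by
  rw [pvIndex?_eq dl c hc]

-- A's positional sum over enumerate of m equals base^i times the Horner value of m.reverse.
theorem pvSumA (v : Char → Int) (base : Int) (m : List Char) (i : Nat) (n : Int) :
    (PySem.List.enumerate m (i : Int)).foldl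
      (fun n pd => n + v pd.2 * base ^ pd.1.toNat) n
    = n + base ^ i * (m.reverse.foldl (fun a c => a * base + v c) 0) := by
  induction m generalizing i n with
  | nil => simp [PySem.List.enumerate_nil]
  | cons x t ih =>
    rw [PySem.List.enumerate_cons]
    simp only [List.foldl_cons, List.reverse_cons]
    have hcast : ((i : Int) + 1) = ((i + 1 : Nat) : Int) := by push_cast; ring
    rw [hcast, ih (i + 1)]
    simp only [List.foldl_append, List.foldl_cons, List.foldl_nil, Int.toNat_natCast]
    ring

-- specialisation at start index 0 (the literal the ports carry)
theorem pvSumA0 (v : Char → Int) (base : Int) (m : List Char) :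
    (PySem.List.enumerate m 0).foldl
      (fun n pd => n + v pd.2 * base ^ pd.1.toNat) 0
    = m.reverse.foldl (fun a c => a * base + v c) 0 := by
  have h := pvSumA v base m 0 0
  simpa using h

-- ===== VERDICT (by name: the statement is the Claim_ definition above) =====
theorem calcbase_spec : Claim_equal_calcbase := by
  intro s digitos _ hpre0
  have hpre : ∀ c ∈ s.toList, c ∈ digitos.toList := by simpa [Pre_calcbase] using hpre0
  unfold Spec_calcbase calcbase calcbase_alt
  simp only []
  rw [pvSumA0 (fun c => match PySem.List.index? digitos.toList c with
        | some k => (k : Int) | none => 0) (PySem.Str.len digitos) s.toList.reverse]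
  simp only [List.reverse_reverse]
  apply PySem.List.foldl_congr_mem
  intro acc x hx
  rw [pvIndex_eq_idxOf _ _ (hpre x hx), pvDict_getD _ _ (hpre x hx)]
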